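-- pv_equiv track=rewrite | github.com/robertvazan/llobot | llobot/text.py | normalize_document
-- ===== SOURCE A (Python) =====
-- def normalize_document(document: str) -> str:
--     """
--     Normalizes a document by:
--     - Removing trailing whitespace on all lines
--     - Removing empty lines at the beginning and end
--     - Ensuring the document is newline-terminated
--     """
--     # Remove trailing whitespace on all lines
--     lines = [line.rstrip() for line in document.splitlines()]
--
--     # Remove empty lines at the beginning
--     while lines and not lines[0]:
--         lines.pop(0)
--
--     # Remove empty lines at the end
--     while lines and not lines[-1]:
--         lines.pop()
--
--     # Join lines and ensure newline termination
--     if not lines: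
--         return ""
--
--     return '\n'.join(lines) + '\n'
-- ===== SOURCE B (Python) =====
-- def normalize_document(document: str) -> str:
--     # Single pass: buffer blank-line runs in a counter, emit separators lazily.
--     parts = []
--     pending = 0
--     for line in document.splitlines():
--         line = line.rstrip()
--         if not line:
--             pending += 1
--         else:
--             if parts:
--                 parts.append('\n' * (pending + 1))
--             pending = 0
--             parts.append(line)
--     if not parts:
--         return ''
--     return ''.join(parts) + '\n'
-- ===== Notes on version B (the rewrite author's own statement) =====
-- stated objective: alternative
-- what changed: Replaces A's build-then-trim approach (rstrip all lines, then two pop-based while loops removing blank lines at both ends, then join) with a single left-to-right pass that buffers blank-line runs in a counter and flushes them as separators only when a later nonblank line appears, so leading and trailing blanks are never materialized.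
import Mathlib
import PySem

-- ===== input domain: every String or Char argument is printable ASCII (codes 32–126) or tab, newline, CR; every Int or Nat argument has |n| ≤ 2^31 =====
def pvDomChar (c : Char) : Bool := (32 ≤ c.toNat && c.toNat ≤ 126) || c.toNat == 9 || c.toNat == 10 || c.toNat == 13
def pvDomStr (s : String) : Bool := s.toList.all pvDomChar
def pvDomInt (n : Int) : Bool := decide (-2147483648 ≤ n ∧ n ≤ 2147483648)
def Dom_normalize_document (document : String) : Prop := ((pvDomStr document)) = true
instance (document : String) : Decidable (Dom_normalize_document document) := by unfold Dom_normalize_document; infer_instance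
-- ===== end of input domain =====

-- B replaces A's two pop-based trimming while-loops by a single left-to-right pass that
-- buffers blank-line runs in a counter and emits separators lazily (objective: alternative).

-- ===== PORT A =====
def normalize_document (document : String) : String :=
  -- lines = [line.rstrip() for line in document.splitlines()]
  let lines := (PySem.Chars.splitlines document.toList).map PySem.Chars.rstrip
  -- while lines and not lines[0]: lines.pop(0)
  let lines := lines.dropWhile (fun l => l.isEmpty)
  -- while lines and not lines[-1]: lines.pop()
  let lines := (lines.reverse.dropWhile (fun l => l.isEmpty)).reverse
  if lines.isEmpty then ""
  else String.ofList (PySem.Chars.join ['\n'] lines ++ ['\n'])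

-- ===== PORT B =====
-- one loop step of Source B: rstrip the line; blank lines only bump the pending counter,
-- a nonblank line flushes the pending separator run and is appended
def ndStep (st : List (List Char) × Nat) (line : List Char) : List (List Char) × Nat :=
  let line := PySem.Chars.rstrip line
  if line.isEmpty then (st.1, st.2 + 1)
  else if st.1.isEmpty then ([line], 0)
  else (st.1 ++ [List.replicate (st.2 + 1) '\n', line], 0)

def normalize_document_alt (document : String) : String :=
  let st := (PySem.Chars.splitlines document.toList).foldl ndStep ([], 0)
  if st.1.isEmpty then ""
  else String.ofList (PySem.Chars.join [] st.1 ++ ['\n'])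

-- ===== PRECONDITION & SPEC =====
def Spec_normalize_document (document : String) (out : String) : Prop := out = normalize_document_alt document
instance (document : String) (out : String) : Decidable (Spec_normalize_document document out) := by unfold Spec_normalize_document; infer_instance

-- ===== CLAIM (what is proved, stated in full; the proofs are below) =====
def Claim_equal_normalize_document : Prop := ∀ (document : String), Dom_normalize_document document → Spec_normalize_document document (normalize_document document)

-- ===== LEMMAS AND PROOFS =====

-- ndStep on an already-rstripped line
def ndStepR (st : List (List Char) × Nat) (line : List Char) : List (List Char) × Nat :=
  if line.isEmpty then (st.1, st.2 + 1)
  else if st.1.isEmpty then ([line], 0)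
  else (st.1 ++ [List.replicate (st.2 + 1) '\n', line], 0)

theorem foldl_ndStep (ls : List (List Char)) (i : List (List Char) × Nat) :
    ls.foldl ndStep i = (ls.map PySem.Chars.rstrip).foldl ndStepR i := by
  rw [List.foldl_map]; rfl

-- structural form of "pop empty lines from the end"
def rtrimS : List (List Char) → List (List Char)
  | [] => []
  | l :: r => match rtrimS r with
    | [] => if l.isEmpty then [] else [l]
    | x :: xs => l :: x :: xs

theorem rtrimS_eq (M : List (List Char)) :
    (M.reverse.dropWhile (fun l => l.isEmpty)).reverse = rtrimS M := by
  induction M with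
  | nil => rfl
  | cons l r ih =>
    have hd : r.reverse.dropWhile (fun l => l.isEmpty) = (rtrimS r).reverse := by
      rw [← ih, List.reverse_reverse]
    rcases hrr : rtrimS r with _ | ⟨x, xs⟩
    · rw [hrr] at hd
      rw [List.reverse_cons, List.dropWhile_append, hd]
      simp only [List.reverse_nil, List.isEmpty_nil, if_true, List.dropWhile_cons,
        List.dropWhile_nil, rtrimS, hrr]
      by_cases hl : l.isEmpty <;> simp [hl]
    · rw [hrr] at hd
      rw [List.reverse_cons, List.dropWhile_append, hd]
      simp [rtrimS, hrr]

-- what B's loop appends after the first nonblank line has been emitted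
def tailRep : List (List Char) → Nat → List (List Char)
  | [], _ => []
  | l :: r, p => if l.isEmpty then tailRep r (p + 1)
                 else List.replicate (p + 1) '\n' :: l :: tailRep r 0

theorem lead_lemma (M : List (List Char)) (p : Nat) :
    (M.foldl ndStepR ([], p)).1 = ((M.dropWhile (fun l => l.isEmpty)).foldl ndStepR ([], 0)).1 := by
  induction M generalizing p with
  | nil => rfl
  | cons l r ih =>
    by_cases hl : l.isEmpty
    · have e1 : ndStepR ([], p) l = ([], p + 1) := by simp [ndStepR, hl]
      simp only [List.foldl_cons, List.dropWhile_cons, hl, if_true, e1]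
      exact ih (p + 1)
    · have e1 : ndStepR ([], p) l = ([l], 0) := by simp [ndStepR, hl]
      have e2 : ndStepR ([], 0) l = ([l], 0) := by simp [ndStepR, hl]
      simp [hl, e1, e2]

theorem main_lemma (M : List (List Char)) (parts : List (List Char)) (p : Nat)
    (h : parts ≠ []) : (M.foldl ndStepR (parts, p)).1 = parts ++ tailRep M p := by
  induction M generalizing parts p with
  | nil => simp [tailRep]
  | cons l r ih =>
    by_cases hl : l.isEmpty
    · simp only [List.foldl_cons, ndStepR, hl, if_true, tailRep]
      exact ih parts (p + 1) h
    · have hp : parts.isEmpty = false := by simpa using h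
      simp only [List.foldl_cons, ndStepR, hl, if_false, hp, Bool.false_eq_true, tailRep]
      rw [ih _ 0 (by simp)]
      simp

theorem join_empty_cons (a : List Char) (xs : List (List Char)) :
    PySem.Chars.join [] (a :: xs) = a ++ PySem.Chars.join [] xs := by
  rcases xs with _ | ⟨b, r⟩
  · simp [PySem.Chars.join_singleton, PySem.Chars.join_nil]
  · simp [PySem.Chars.join_cons_cons]

theorem join_tailRep (r : List (List Char)) (p : Nat) :
    PySem.Chars.join [] (tailRep r p) =
      if rtrimS r = [] then []
      else List.replicate p '\n' ++ '\n' :: PySem.Chars.join ['\n'] (rtrimS r) := by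
  induction r generalizing p with
  | nil => simp [tailRep, rtrimS, PySem.Chars.join_nil]
  | cons l r ih =>
    by_cases hl : l.isEmpty
    · have hl' : l = [] := by simpa using hl
      rw [show tailRep (l :: r) p = tailRep r (p + 1) from by simp [tailRep, hl], ih]
      rcases h : rtrimS r with _ | ⟨x, xs⟩
      · simp [rtrimS, hl, h]
      · have hc : rtrimS (l :: r) = l :: x :: xs := by simp [rtrimS, h]
        rw [hc]
        subst hl'
        simp [PySem.Chars.join_cons_cons, List.replicate_succ']
    · have hl' : ¬ l = [] := by simpa using hl
      rw [show tailRep (l :: r) p = List.replicate (p + 1) '\n' :: l :: tailRep r 0 from by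
            simp [tailRep, hl],
          join_empty_cons, join_empty_cons, ih]
      rcases h : rtrimS r with _ | ⟨x, xs⟩
      · have hc : rtrimS (l :: r) = [l] := by simp [rtrimS, h, hl']
        rw [hc]
        simp [PySem.Chars.join_singleton, List.replicate_succ']
      · have hc : rtrimS (l :: r) = l :: x :: xs := by simp [rtrimS, h]
        rw [hc]
        simp [PySem.Chars.join_cons_cons, List.replicate_succ']

theorem dropWhile_head_false {p : List Char → Bool} {M : List (List Char)}
    {l : List Char} {rest : List (List Char)}
    (h : M.dropWhile p = l :: rest) : p l = false := by
  have := List.head?_dropWhile_not p M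
  rw [h] at this
  simpa using this

-- ===== VERDICT (by name: the statement is the Claim_ definition above) =====
theorem normalize_document_spec : Claim_equal_normalize_document := by
  intro document _
  unfold Spec_normalize_document normalize_document normalize_document_alt
  dsimp only
  rw [foldl_ndStep, lead_lemma]
  generalize (PySem.Chars.splitlines document.toList).map PySem.Chars.rstrip = M
  rcases h : M.dropWhile (fun l => l.isEmpty) with _ | ⟨l, rest⟩
  · rw [h]; simp
  · rw [h]
    have hl : l.isEmpty = false := dropWhile_head_false h
    have hl' : ¬ l = [] := by simpa using hl
    have step1 : ndStepR ([], 0) l = ([l], 0) := by simp [ndStepR, hl]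
    have hparts : (((l :: rest).foldl ndStepR ([], 0)).1) = l :: tailRep rest 0 := by
      rw [List.foldl_cons, step1]
      exact main_lemma rest [l] 0 (by simp)
    rw [rtrimS_eq, hparts]
    rcases hr : rtrimS rest with _ | ⟨x, xs⟩
    · have hc : rtrimS (l :: rest) = [l] := by simp [rtrimS, hr, hl']
      have hB : PySem.Chars.join [] (l :: tailRep rest 0) = l := by
        rw [join_empty_cons, join_tailRep, hr]; simp
      rw [hc, hB]
      simp [PySem.Chars.join_singleton]
    · have hc : rtrimS (l :: rest) = l :: x :: xs := by simp [rtrimS, hr]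
      have hB : PySem.Chars.join [] (l :: tailRep rest 0) =
          l ++ '\n' :: PySem.Chars.join ['\n'] (x :: xs) := by
        rw [join_empty_cons, join_tailRep, hr]; simp
      rw [hc, hB]
      simp [PySem.Chars.join_cons_cons]
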